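-- pv_equiv track=rewrite | github.com/Evil-Null/shadow-code | shadow_code/display.py | _find_closing_backticks
-- ===== SOURCE A (Python) =====
-- def _find_closing_backticks(text: str) -> int | None:
--     """Find closing ``` in text that ends a tool_call block.
--
--     The closing ``` must be at the start of a line (possibly with leading whitespace).
--     Returns the position of the ``` in text, or None if not found.
--     """
--     pos = 0
--     while pos < len(text):
--         idx = text.find("```", pos)
--         if idx == -1:
--             return None
--         # Check that this ``` is at the start of a line (or start of text)
--         if idx == 0 or text[idx - 1] == "\n":
--             # Make sure this isn't another opening like ```python (just closing ```)
--             after = text[idx + 3 :]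
--             # Closing ``` is followed by nothing, whitespace, or newline
--             if not after or after[0] in ("\n", "\r", " ", "\t"):
--                 return idx
--             # If followed by a letter, it's a new code block opening, not our close
--             # Skip past it
--             pos = idx + 3
--         else:
--             pos = idx + 3
--     return None
-- ===== SOURCE B (Python) =====
-- def _find_closing_backticks(text: str) -> int | None:
--     offset = 0
--     for part in text.split("\n"):
--         if part.startswith("```") and (len(part) == 3 or part[3] in "\r \t"):
--             return offset
--         offset += len(part) + 1
--     return None
-- ===== Notes on version B (the rewrite author's own statement) =====
-- stated objective: idiomatic
-- what changed: Replaces the find()-and-skip scanning loop over raw backtick-fence occurrences by a single pass over the newline-separated lines of the text with a running offset, testing only the start of each line.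
import Mathlib
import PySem

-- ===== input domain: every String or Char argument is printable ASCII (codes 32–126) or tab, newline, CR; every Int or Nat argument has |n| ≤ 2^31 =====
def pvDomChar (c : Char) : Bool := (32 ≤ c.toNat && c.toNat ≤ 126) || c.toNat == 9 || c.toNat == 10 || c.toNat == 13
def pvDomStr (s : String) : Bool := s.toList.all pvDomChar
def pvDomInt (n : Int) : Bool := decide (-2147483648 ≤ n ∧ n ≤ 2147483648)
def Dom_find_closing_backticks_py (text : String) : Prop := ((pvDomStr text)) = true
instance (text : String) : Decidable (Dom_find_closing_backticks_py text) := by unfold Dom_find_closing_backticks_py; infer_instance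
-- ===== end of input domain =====

-- B replaces A's find()-and-skip scan over raw backtick-fence occurrences by a single
-- pass over the newline-separated lines with a running offset (objective: idiomatic).

-- ===== PORT A =====
def pvTicks : List Char := ['`', '`', '`']
def pvLoopA (cs : List Char) (pos : Nat) : Option Int :=
  if hpos : pos < cs.length then
    if hneg : PySem.Chars.findFrom cs pvTicks (pos : Int) none = -1 then none
    else if PySem.Chars.findFrom cs pvTicks (pos : Int) none = 0
        ∨ PySem.List.pyGet? cs (PySem.Chars.findFrom cs pvTicks (pos : Int) none - 1) = some '\n' then
      if PySem.List.slice cs (some (PySem.Chars.findFrom cs pvTicks (pos : Int) none + 3)) none = []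
          ∨ PySem.List.pyGet? (PySem.List.slice cs (some (PySem.Chars.findFrom cs pvTicks (pos : Int) none + 3)) none) 0 = some '\n'
          ∨ PySem.List.pyGet? (PySem.List.slice cs (some (PySem.Chars.findFrom cs pvTicks (pos : Int) none + 3)) none) 0 = some '\r'
          ∨ PySem.List.pyGet? (PySem.List.slice cs (some (PySem.Chars.findFrom cs pvTicks (pos : Int) none + 3)) none) 0 = some ' '
          ∨ PySem.List.pyGet? (PySem.List.slice cs (some (PySem.Chars.findFrom cs pvTicks (pos : Int) none + 3)) none) 0 = some '\t' then
        some (PySem.Chars.findFrom cs pvTicks (pos : Int) none)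
      else pvLoopA cs ((PySem.Chars.findFrom cs pvTicks (pos : Int) none).toNat + 3)
    else pvLoopA cs ((PySem.Chars.findFrom cs pvTicks (pos : Int) none).toNat + 3)
  else none
termination_by cs.length - pos
decreasing_by
  · have h := (PySem.Chars.findFrom_natCast_spec cs pvTicks pos (le_of_lt hpos) hneg).1
    omega
  · have h := (PySem.Chars.findFrom_natCast_spec cs pvTicks pos (le_of_lt hpos) hneg).1
    omega

def find_closing_backticks_py (text : String) : Option Int := pvLoopA text.toList 0

-- ===== PORT B =====
def pvGoodLine (part : List Char) : Bool :=
  PySem.Chars.startswith part pvTicks &&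
    (part.length == 3 || (PySem.List.pyGet? part 3 == some '\r'
      || PySem.List.pyGet? part 3 == some ' ' || PySem.List.pyGet? part 3 == some '\t'))

def pvLoopB : List (List Char) → Int → Option Int
  | [], _ => none
  | part :: rest, offset =>
    if pvGoodLine part then some offset
    else pvLoopB rest (offset + part.length + 1)

def find_closing_backticks_py_alt (text : String) : Option Int :=
  pvLoopB (PySem.Chars.splitOn text.toList ['\n']) 0

-- ===== PRECONDITION & SPEC =====
def Spec_find_closing_backticks_py (text : String) (out : Option Int) : Prop := out = find_closing_backticks_py_alt text
instance (text : String) (out : Option Int) : Decidable (Spec_find_closing_backticks_py text out) := by unfold Spec_find_closing_backticks_py; infer_instance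

-- ===== CLAIM (what is proved, stated in full; the proofs are below) =====
def Claim_equal_find_closing_backticks_py : Prop := ∀ (text : String), Dom_find_closing_backticks_py text → Spec_find_closing_backticks_py text (find_closing_backticks_py text)

-- ===== LEMMAS AND PROOFS =====

def pvQual (cs : List Char) (i : Nat) : Bool :=
  decide (pvTicks <+: cs.drop i ∧ (i = 0 ∨ cs[i-1]? = some '\n') ∧
    (cs[i+3]? = none ∨ cs[i+3]? = some '\n' ∨ cs[i+3]? = some '\r'
      ∨ cs[i+3]? = some ' ' ∨ cs[i+3]? = some '\t'))
def pvFirstFrom (cs : List Char) (pos : Nat) : Option Nat :=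
  if pos < cs.length then
    if pvQual cs pos then some pos else pvFirstFrom cs (pos + 1)
  else none
termination_by cs.length - pos

theorem pvQual_lt {cs : List Char} {i : Nat} (h : pvQual cs i = true) : i < cs.length := by
  rw [pvQual, decide_eq_true_iff] at h
  have := h.1.length_le
  simp [List.length_drop, pvTicks] at this
  omega
theorem pvFirstFrom_skip (cs : List Char) (pos q : Nat) (hle : pos ≤ q)
    (h : ∀ j, pos ≤ j → j < q → pvQual cs j = false) :
    pvFirstFrom cs pos = pvFirstFrom cs q := by
  rcases Nat.eq_or_lt_of_le hle with heq | hlt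
  · rw [heq]
  · rw [pvFirstFrom]
    by_cases hpos : pos < cs.length
    · rw [if_pos hpos, h pos le_rfl hlt]
      simp only [Bool.false_eq_true, if_false]
      exact pvFirstFrom_skip cs (pos+1) q hlt (fun j h1 h2 => h j (by omega) h2)
    · rw [if_neg hpos, pvFirstFrom]
      rw [if_neg (by omega)]
termination_by q - pos
theorem pvFirstFrom_none (cs : List Char) (pos : Nat)
    (h : ∀ j, pos ≤ j → pvQual cs j = false) : pvFirstFrom cs pos = none := by
  rw [pvFirstFrom]
  by_cases hpos : pos < cs.length
  · rw [if_pos hpos, h pos le_rfl]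
    simp only [Bool.false_eq_true, if_false]
    exact pvFirstFrom_none cs (pos+1) (fun j h1 => h j (by omega))
  · rw [if_neg hpos]
termination_by cs.length - pos
theorem pvFirstFrom_stop (cs : List Char) (pos i : Nat) (hle : pos ≤ i)
    (hq : pvQual cs i = true) (h : ∀ j, pos ≤ j → j < i → pvQual cs j = false) :
    pvFirstFrom cs pos = some i := by
  rw [pvFirstFrom_skip cs pos i hle h, pvFirstFrom, if_pos (pvQual_lt hq), hq]
  simp
theorem pvTicks_getElem {cs : List Char} {i : Nat} (h : pvTicks <+: cs.drop i) :
    ∀ k, k < 3 → cs[i + k]? = some '`' := by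
  intro k hk
  obtain ⟨t, ht⟩ := h
  have : cs[i + k]? = (cs.drop i)[k]? := by rw [List.getElem?_drop]
  rw [this, ← ht, List.getElem?_append_left (by simp [pvTicks]; omega)]
  interval_cases k <;> rfl

theorem pvAfter_eq (cs : List Char) (i : Nat) :
    PySem.List.slice cs (some ((i : Int) + 3)) none = cs.drop (i + 3) := by
  rw [PySem.List.slice_from (xs := cs) (a := (i : Int) + 3) (by omega)]
  congr 1

theorem pvC1_iff (cs : List Char) (i : Nat) :
    ((i : Int) = 0 ∨ PySem.List.pyGet? cs ((i : Int) - 1) = some '\n')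
      ↔ (i = 0 ∨ cs[i-1]? = some '\n') := by
  rcases Nat.eq_zero_or_pos i with h0 | hpos
  · subst h0; simp
  · have h1 : (i : Int) ≠ 0 := by omega
    have h2 : (i : Int) - 1 = ((i - 1 : Nat) : Int) := by omega
    rw [h2, PySem.List.pyGet?_natCast]
    constructor
    · rintro (h | h)
      · omega
      · exact Or.inr h
    · rintro (h | h)
      · omega
      · exact Or.inr h

theorem pvC2_iff (cs : List Char) (i : Nat) :
    (cs.drop (i+3) = [] ∨ PySem.List.pyGet? (cs.drop (i+3)) 0 = some '\n'
      ∨ PySem.List.pyGet? (cs.drop (i+3)) 0 = some '\r'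
      ∨ PySem.List.pyGet? (cs.drop (i+3)) 0 = some ' '
      ∨ PySem.List.pyGet? (cs.drop (i+3)) 0 = some '\t')
      ↔ (cs[i+3]? = none ∨ cs[i+3]? = some '\n' ∨ cs[i+3]? = some '\r'
      ∨ cs[i+3]? = some ' ' ∨ cs[i+3]? = some '\t') := by
  have hg : PySem.List.pyGet? (cs.drop (i+3)) 0 = cs[i+3]? := by
    have h0 : (0 : Int) = ((0 : Nat) : Int) := rfl
    rw [h0, PySem.List.pyGet?_natCast, List.getElem?_drop]
  have he : cs.drop (i+3) = [] ↔ cs[i+3]? = none := by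
    rw [List.drop_eq_nil_iff, List.getElem?_eq_none_iff]
  rw [hg, he]

theorem pvPrefix_infix {p cs : List Char} {pos j : Nat} (hj : pos ≤ j) (h : p <+: cs.drop j) :
    p <:+: cs.drop pos := by
  have hd : cs.drop j = (cs.drop pos).drop (j - pos) := by
    rw [List.drop_drop]; congr 1; omega
  rw [hd] at h
  exact h.isInfix.trans (List.drop_suffix _ _).isInfix

theorem pvLoopA_eq (cs : List Char) (pos : Nat) :
    pvLoopA cs pos = (pvFirstFrom cs pos).map (fun n => (n : Int)) := by
  fun_induction pvLoopA cs pos with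
  | case1 x hlt hneg =>
    rw [pvFirstFrom_none cs x ?_]
    · rfl
    · intro j hj
      rw [pvQual, decide_eq_false_iff_not]
      rintro ⟨hp, -, -⟩
      rw [PySem.Chars.findFrom_natCast_eq_neg_one_iff cs pvTicks x (le_of_lt hlt)] at hneg
      exact hneg (pvPrefix_infix hj hp)
  | case2 x hlt hneg hc1 hc2 =>
    have hspec := PySem.Chars.findFrom_natCast_spec cs pvTicks x (le_of_lt hlt) hneg
    have hix : PySem.Chars.findFrom cs pvTicks (x : Int) none
        = (((PySem.Chars.findFrom cs pvTicks (x : Int) none).toNat : Nat) : Int) := by omega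
    set i := (PySem.Chars.findFrom cs pvTicks (x : Int) none).toNat with hi
    rw [hix] at hc1 hc2
    rw [pvAfter_eq cs i] at hc2
    have hq : pvQual cs i = true := by
      rw [pvQual, decide_eq_true_iff]
      exact ⟨hspec.2.1, (pvC1_iff cs i).mp hc1, (pvC2_iff cs i).mp hc2⟩
    have hnotq : ∀ j, x ≤ j → j < i → pvQual cs j = false := by
      intro j h1 h2
      rw [pvQual, decide_eq_false_iff_not]
      rintro ⟨hp, -, -⟩
      exact hspec.2.2 j h1 h2 hp
    rw [pvFirstFrom_stop cs x i (by omega) hq hnotq, hix]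
    rfl
  | case3 x hlt hneg hc1 hc2 ih =>
    have hspec := PySem.Chars.findFrom_natCast_spec cs pvTicks x (le_of_lt hlt) hneg
    have hix : PySem.Chars.findFrom cs pvTicks (x : Int) none
        = (((PySem.Chars.findFrom cs pvTicks (x : Int) none).toNat : Nat) : Int) := by omega
    set i := (PySem.Chars.findFrom cs pvTicks (x : Int) none).toNat with hi
    rw [hix] at hc2
    rw [pvAfter_eq cs i] at hc2
    have hnone : ∀ j, x ≤ j → j < i + 3 → pvQual cs j = false := by
      intro j h1 h2
      rw [pvQual, decide_eq_false_iff_not]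
      rintro ⟨hp, hq1, hq2⟩
      rcases Nat.lt_or_ge j i with hji | hji
      · exact hspec.2.2 j h1 hji hp
      · rcases Nat.eq_or_lt_of_le hji with heq | hji'
        · rw [← heq] at hq2; exact hc2 ((pvC2_iff cs i).mpr hq2)
        · have hb : cs[i + (j - 1 - i)]? = some '`' := pvTicks_getElem hspec.2.1 (j - 1 - i) (by omega)
          have hbt : cs[j-1]? = some '`' := by rw [show i + (j - 1 - i) = j - 1 by omega] at hb; exact hb
          rcases hq1 with h0 | hnl
          · omega
          · rw [hbt] at hnl; exact absurd (Option.some.inj hnl) (by decide)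
    rw [ih, ← pvFirstFrom_skip cs x (i + 3) (by omega) hnone]
  | case4 x hlt hneg hc1 ih =>
    have hspec := PySem.Chars.findFrom_natCast_spec cs pvTicks x (le_of_lt hlt) hneg
    have hix : PySem.Chars.findFrom cs pvTicks (x : Int) none
        = (((PySem.Chars.findFrom cs pvTicks (x : Int) none).toNat : Nat) : Int) := by omega
    set i := (PySem.Chars.findFrom cs pvTicks (x : Int) none).toNat with hi
    rw [hix] at hc1
    have hnone : ∀ j, x ≤ j → j < i + 3 → pvQual cs j = false := by
      intro j h1 h2
      rw [pvQual, decide_eq_false_iff_not]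
      rintro ⟨hp, hq1, hq2⟩
      rcases Nat.lt_or_ge j i with hji | hji
      · exact hspec.2.2 j h1 hji hp
      · rcases Nat.eq_or_lt_of_le hji with heq | hji'
        · rw [← heq] at hq1; exact hc1 ((pvC1_iff cs i).mpr hq1)
        · have hb : cs[i + (j - 1 - i)]? = some '`' := pvTicks_getElem hspec.2.1 (j - 1 - i) (by omega)
          have hbt : cs[j-1]? = some '`' := by rw [show i + (j - 1 - i) = j - 1 by omega] at hb; exact hb
          rcases hq1 with h0 | hnl
          · omega
          · rw [hbt] at hnl; exact absurd (Option.some.inj hnl) (by decide)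
    rw [ih, ← pvFirstFrom_skip cs x (i + 3) (by omega) hnone]
  | case5 x hge =>
    rw [pvFirstFrom_none cs x ?_]
    · rfl
    · intro j hj
      cases hq : pvQual cs j
      · rfl
      · exact absurd (pvQual_lt hq) (by omega)

theorem pvGo_nl_step (fuel : Nat) (rest cur : List Char) (acc : List (List Char)) :
    PySem.Chars.splitOn.go ['\n'] (fuel+1) ('\n' :: rest) cur acc
      = PySem.Chars.splitOn.go ['\n'] fuel rest [] (cur.reverse :: acc) := by
  rw [PySem.Chars.splitOn.go.eq_def]
  simp [List.isPrefixOf]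

theorem pvGo_ch_step (fuel : Nat) (c : Char) (rest cur : List Char) (acc : List (List Char))
    (h : c ≠ '\n') :
    PySem.Chars.splitOn.go ['\n'] (fuel+1) (c :: rest) cur acc
      = PySem.Chars.splitOn.go ['\n'] fuel rest (c :: cur) acc := by
  rw [PySem.Chars.splitOn.go.eq_def]
  simp [List.isPrefixOf, Ne.symm h]

theorem pvGo_nil (fuel : Nat) (cur : List Char) (acc : List (List Char)) :
    PySem.Chars.splitOn.go ['\n'] fuel [] cur acc = (cur.reverse :: acc).reverse := by
  rw [PySem.Chars.splitOn.go.eq_def]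
  cases fuel <;> simp

theorem pvGo_no_nl (m : List Char) (hm : '\n' ∉ m) :
    ∀ (fuel : Nat) (cur : List Char) (acc : List (List Char)), m.length ≤ fuel →
      PySem.Chars.splitOn.go ['\n'] fuel m cur acc = acc.reverse ++ [cur.reverse ++ m] := by
  induction m with
  | nil => intro fuel cur acc _; rw [pvGo_nil]; simp
  | cons c m' ih =>
    intro fuel cur acc hf
    obtain ⟨f, rfl⟩ : ∃ f, fuel = f + 1 := ⟨fuel - 1, by simp at hf; try omega⟩
    rw [pvGo_ch_step f c m' cur acc (fun h => hm (h ▸ List.mem_cons_self))]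
    rw [ih (fun h => hm (List.mem_cons_of_mem _ h)) f (c :: cur) acc (by simp at hf ⊢; omega)]
    simp

theorem pvGo_acc (m : List Char) :
    ∀ (fuel : Nat) (cur : List Char) (acc : List (List Char)), m.length ≤ fuel →
      PySem.Chars.splitOn.go ['\n'] fuel m cur acc
        = acc.reverse ++ PySem.Chars.splitOn.go ['\n'] m.length m cur [] := by
  induction m with
  | nil => intro fuel cur acc _; rw [pvGo_nil, pvGo_nil]; simp
  | cons c m' ih =>
    intro fuel cur acc hf
    obtain ⟨f, rfl⟩ : ∃ f, fuel = f + 1 := ⟨fuel - 1, by simp at hf; try omega⟩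
    have hlen : (c :: m').length = m'.length + 1 := by simp
    by_cases hc : c = '\n'
    · subst hc
      rw [pvGo_nl_step, hlen, pvGo_nl_step]
      rw [ih f [] (cur.reverse :: acc) (by simp at hf; try omega),
          ih m'.length [] [cur.reverse] le_rfl]
      simp
    · rw [pvGo_ch_step f c m' cur acc hc, hlen, pvGo_ch_step m'.length c m' cur [] hc]
      rw [ih f (c :: cur) acc (by simp at hf; try omega), ih m'.length (c :: cur) [] le_rfl]

theorem pvGo_line (l : List Char) (hl : '\n' ∉ l) :
    ∀ (rest : List Char) (fuel : Nat) (cur : List Char) (acc : List (List Char)),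
      l.length + 1 ≤ fuel →
      PySem.Chars.splitOn.go ['\n'] fuel (l ++ '\n' :: rest) cur acc
        = PySem.Chars.splitOn.go ['\n'] (fuel - (l.length + 1)) rest [] ((cur.reverse ++ l) :: acc) := by
  induction l with
  | nil =>
    intro rest fuel cur acc hf
    obtain ⟨f, rfl⟩ : ∃ f, fuel = f + 1 := ⟨fuel - 1, by omega⟩
    rw [List.nil_append, pvGo_nl_step]
    simp
  | cons c l' ih =>
    intro rest fuel cur acc hf
    obtain ⟨f, rfl⟩ : ∃ f, fuel = f + 1 := ⟨fuel - 1, by simp at hf ⊢; omega⟩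
    rw [List.cons_append, pvGo_ch_step f c _ cur acc (fun h => hl (h ▸ List.mem_cons_self))]
    rw [ih (fun h => hl (List.mem_cons_of_mem _ h)) rest f (c :: cur) acc (by simp at hf; try omega)]
    have h1 : f + 1 - ((c :: l').length + 1) = f - (l'.length + 1) := by simp; try omega
    have h2 : (c :: cur).reverse ++ l' = cur.reverse ++ (c :: l') := by simp
    rw [h1, h2]

theorem pvSplit_no_nl (cs : List Char) (h : '\n' ∉ cs) :
    PySem.Chars.splitOn cs ['\n'] = [cs] := by
  rw [PySem.Chars.splitOn, pvGo_no_nl cs h (cs.length + 1) [] [] (by omega)]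
  simp

theorem pvSplit_cons (l rest : List Char) (hl : '\n' ∉ l) :
    PySem.Chars.splitOn (l ++ '\n' :: rest) ['\n'] = l :: PySem.Chars.splitOn rest ['\n'] := by
  rw [PySem.Chars.splitOn, pvGo_line l hl rest _ [] [] (by simp)]
  have hfuel : (l ++ '\n' :: rest).length + 1 - (l.length + 1) = rest.length + 1 := by
    simp
  simp only [hfuel, List.reverse_nil, List.nil_append]
  rw [pvGo_acc rest _ [] [l] (by omega), PySem.Chars.splitOn]
  rw [show PySem.Chars.splitOn.go ['\n'] (rest.length + 1) rest [] []
        = [].reverse ++ PySem.Chars.splitOn.go ['\n'] rest.length rest [] [] from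
      pvGo_acc rest _ [] [] (by omega)]
  simp

theorem pvGet3 (l : List Char) : PySem.List.pyGet? l (3 : Int) = l[3]? := by
  rw [show (3 : Int) = ((3 : Nat) : Int) from rfl, PySem.List.pyGet?_natCast]

-- pvQual at position 0 is exactly B's line test, for a first line followed by nothing or '\n'
theorem pvQual_zero_eq (l : List Char) (hnl : '\n' ∉ l) (s : List Char)
    (hs : s = [] ∨ ∃ t, s = '\n' :: t) :
    pvQual (l ++ s) 0 = pvGoodLine l := by
  cases hgl : pvGoodLine l
  · rw [pvQual, decide_eq_false_iff_not]
    simp only [pvGoodLine, Bool.and_eq_false_iff, Bool.or_eq_false_iff,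
      beq_eq_false_iff_ne, ne_eq, pvGet3] at hgl
    rintro ⟨hp, -, h3⟩
    rw [List.drop_zero] at hp
    -- pvTicks is a prefix of l
    have hlen3 : 3 ≤ l.length := by
      by_contra hlen
      have hb : (l ++ s)[l.length]? = some '`' := by
        have := pvTicks_getElem (i := 0) (by simpa using hp) l.length (by omega)
        simpa using this
      rcases hs with rfl | ⟨t, rfl⟩
      · rw [List.getElem?_append_right le_rfl] at hb; simp at hb
      · rw [List.getElem?_append_right le_rfl] at hb
        simp at hb
    have hpl : pvTicks <+: l := by
      have h1 : pvTicks = (l ++ s).take 3 := by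
        obtain ⟨t, ht⟩ := hp
        rw [← ht]
        simp [pvTicks]
      have h2 : (l ++ s).take 3 = l.take 3 := List.take_append_of_le_length hlen3
      rw [h1, h2]
      exact List.take_prefix _ _
    rcases hgl with hbad | ⟨hne3, ⟨hr, hsp⟩, ht⟩
    · exact absurd ((PySem.Chars.startswith_iff l pvTicks).mpr hpl) (by simp [hbad])
    · -- l.length > 3 : the char after ``` is l[3]
      have hl4 : 3 < l.length := by omega
      have hg : (l ++ s)[(0:Nat)+3]? = l[3]? := by
        simpa using List.getElem?_append_left hl4
      rw [hg] at h3
      have hmem : l[3] ∈ l := List.getElem_mem _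
      rcases h3 with h | h | h | h | h
      · simp [List.getElem?_eq_getElem hl4] at h
      · rw [List.getElem?_eq_getElem hl4] at h
        exact hnl (Option.some.inj h ▸ hmem)
      · exact hr (by rw [List.getElem?_eq_getElem hl4] at h ⊢; exact h)
      · exact hsp (by rw [List.getElem?_eq_getElem hl4] at h ⊢; exact h)
      · exact ht (by rw [List.getElem?_eq_getElem hl4] at h ⊢; exact h)
  · rw [pvQual, decide_eq_true_iff]
    simp only [pvGoodLine, Bool.and_eq_true, Bool.or_eq_true, beq_iff_eq,
      PySem.Chars.startswith_iff, pvGet3] at hgl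
    obtain ⟨hpl, hrest⟩ := hgl
    have hlen3 : 3 ≤ l.length := hpl.length_le
    refine ⟨by rw [List.drop_zero]; exact hpl.trans (l.prefix_append s), Or.inl rfl, ?_⟩
    rcases hrest with h3 | hchar
    · -- len l = 3 : next is end of text or the '\n'
      have hg : (l ++ s)[(0:Nat)+3]? = s[0]? := by
        rw [List.getElem?_append_right (by omega)]
        congr 1
        omega
      rcases hs with rfl | ⟨t, rfl⟩
      · left; rw [hg]; rfl
      · right; left; rw [hg]; rfl
    · have hl4 : 3 < l.length := by
        rcases Nat.eq_or_lt_of_le hlen3 with h | h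
        · exfalso
          have hnone : l[3]? = none := by rw [List.getElem?_eq_none_iff]; omega
          simp [hnone] at hchar
        · exact h
      have hg : (l ++ s)[(0:Nat)+3]? = l[3]? := by
        simpa using List.getElem?_append_left hl4
      rw [hg]
      rcases hchar with (h' | h') | h'
      · exact Or.inr (Or.inr (Or.inl h'))
      · exact Or.inr (Or.inr (Or.inr (Or.inl h')))
      · exact Or.inr (Or.inr (Or.inr (Or.inr h')))

theorem pvQual_mid (l s : List Char) (hl : '\n' ∉ l) (i : Nat) (h1 : 1 ≤ i) (h2 : i ≤ l.length) :
    pvQual (l ++ s) i = false := by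
  rw [pvQual, decide_eq_false_iff_not]
  rintro ⟨-, hq1, -⟩
  rcases hq1 with h0 | hnl
  · omega
  · have hlt : i - 1 < l.length := by omega
    rw [List.getElem?_append_left hlt, List.getElem?_eq_getElem hlt] at hnl
    exact hl (Option.some.inj hnl ▸ List.getElem_mem _)

theorem pvQual_shift (l rest : List Char) (k : Nat) :
    pvQual (l ++ '\n' :: rest) (l.length + 1 + k) = pvQual rest k := by
  have hidx : ∀ m : Nat, (l ++ '\n' :: rest)[l.length + m]? = ('\n' :: rest)[m]? := by
    intro m
    rw [List.getElem?_append_right (by omega)]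
    congr 1
    omega
  have hdrop : (l ++ '\n' :: rest).drop (l.length + 1 + k) = rest.drop k := by
    rw [show l.length + 1 + k = l.length + (1 + k) by omega,
        List.drop_length_add_append (1 + k), show 1 + k = k + 1 by omega,
        List.drop_succ_cons]
  rw [pvQual, pvQual, decide_eq_decide]
  refine and_congr ?_ (and_congr ?_ ?_)
  · rw [hdrop]
  · rcases Nat.eq_zero_or_pos k with rfl | hk
    · constructor
      · intro _
        exact Or.inl rfl
      · intro _
        right
        rw [show l.length + 1 + 0 - 1 = l.length + 0 by omega, hidx 0]
        rfl
    · have e1 : l.length + 1 + k - 1 = l.length + k := by omega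
      have e2 : ('\n' :: rest)[k]? = rest[k-1]? := by
        rcases k with _ | k'
        · omega
        · simp
      rw [e1, hidx k, e2]
      constructor
      · rintro (h0 | h)
        · omega
        · exact Or.inr h
      · rintro (h0 | h)
        · omega
        · exact Or.inr h
  · rw [show l.length + 1 + k + 3 = l.length + (k + 4) by omega, hidx (k + 4),
        show ('\n' :: rest)[k+4]? = rest[k+3]? by simp]

theorem pvFirstFrom_shift (l rest : List Char) (p : Nat) :
    pvFirstFrom (l ++ '\n' :: rest) (l.length + 1 + p)
      = (pvFirstFrom rest p).map (fun n => l.length + 1 + n) := by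
  conv_lhs => rw [pvFirstFrom]
  conv_rhs => rw [pvFirstFrom]
  have hlen : (l ++ '\n' :: rest).length = l.length + 1 + rest.length := by simp; omega
  by_cases hp : p < rest.length
  · rw [if_pos (by omega), if_pos hp, pvQual_shift l rest p]
    by_cases hq : pvQual rest p
    · rw [if_pos hq, if_pos hq]
      rfl
    · rw [if_neg hq, if_neg hq,
        show l.length + 1 + p + 1 = l.length + 1 + (p + 1) by omega]
      exact pvFirstFrom_shift l rest (p + 1)
  · rw [if_neg (by omega), if_neg (by omega)]
    rfl
termination_by rest.length - p

theorem pvSplitPoint (cs : List Char) (h : '\n' ∈ cs) :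
    ∃ l rest, cs = l ++ '\n' :: rest ∧ '\n' ∉ l := by
  refine ⟨cs.takeWhile (· ≠ '\n'), (cs.dropWhile (· ≠ '\n')).tail, ?_, ?_⟩
  · have hne : cs.dropWhile (· ≠ '\n') ≠ [] := by
      intro he
      have h2 := List.dropWhile_eq_nil_iff.mp he
      simp at h2
      exact h2 _ h rfl
    have hhead : (cs.dropWhile (· ≠ '\n')).head hne = '\n' := by
      have := List.head_dropWhile_not (p := (· ≠ '\n')) (l := cs) hne
      simpa using this
    conv_lhs => rw [← List.takeWhile_append_dropWhile (p := (· ≠ '\n')) (l := cs)]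
    congr 1
    conv_lhs => rw [← List.cons_head_tail hne]
    rw [hhead]
  · intro hmem
    have := List.mem_takeWhile_imp hmem
    simp at this

theorem pvLoopB_eq (cs : List Char) (offset : Int) :
    pvLoopB (PySem.Chars.splitOn cs ['\n']) offset
      = (pvFirstFrom cs 0).map (fun n : Nat => offset + (n : Int)) := by
  by_cases hmem : '\n' ∈ cs
  · obtain ⟨l, rest, rfl, hl⟩ := pvSplitPoint cs hmem
    rw [pvSplit_cons l rest hl, pvLoopB]
    by_cases hg : pvGoodLine l
    · rw [if_pos hg]
      have hq0 : pvQual (l ++ '\n' :: rest) 0 = true := by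
        rw [pvQual_zero_eq l hl _ (Or.inr ⟨rest, rfl⟩), hg]
      rw [pvFirstFrom_stop _ 0 0 le_rfl hq0 (fun j h1 h2 => absurd h2 (by omega))]
      simp
    · rw [if_neg hg]
      rw [pvLoopB_eq rest (offset + l.length + 1)]
      have hskip : pvFirstFrom (l ++ '\n' :: rest) 0
          = pvFirstFrom (l ++ '\n' :: rest) (l.length + 1) := by
        refine pvFirstFrom_skip _ 0 (l.length + 1) (by omega) ?_
        intro j _ h2
        rcases Nat.eq_zero_or_pos j with rfl | hj
        · rw [pvQual_zero_eq l hl _ (Or.inr ⟨rest, rfl⟩)]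
          exact Bool.not_eq_true _ ▸ (by simpa using hg)
        · exact pvQual_mid l _ hl j hj (by omega)
      rw [hskip, show l.length + 1 = l.length + 1 + 0 by omega, pvFirstFrom_shift l rest 0]
      cases pvFirstFrom rest 0 with
      | none => rfl
      | some n =>
        simp
        omega
  · rw [pvSplit_no_nl cs hmem, pvLoopB]
    by_cases hg : pvGoodLine cs
    · rw [if_pos hg]
      have hq0 : pvQual cs 0 = true := by
        have hz := pvQual_zero_eq cs hmem [] (Or.inl rfl)
        rw [List.append_nil] at hz
        rw [hz, hg]
      rw [pvFirstFrom_stop cs 0 0 le_rfl hq0 (fun j h1 h2 => absurd h2 (by omega))]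
      simp
    · rw [if_neg hg, pvLoopB]
      have hnone : ∀ j, 0 ≤ j → pvQual cs j = false := by
        intro j _
        rcases Nat.eq_zero_or_pos j with rfl | hj
        · have hz := pvQual_zero_eq cs hmem [] (Or.inl rfl)
          rw [List.append_nil] at hz
          rw [hz]
          simpa using hg
        · by_cases hle : j ≤ cs.length
          · have := pvQual_mid cs [] hmem j hj hle
            rwa [List.append_nil] at this
          · cases hq : pvQual cs j
            · rfl
            · exact absurd (pvQual_lt hq) (by omega)
      rw [pvFirstFrom_none cs 0 hnone]
      rfl
termination_by cs.length
decreasing_by subst_vars; simp; try omega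

-- ===== VERDICT (by name: the statement is the Claim_ definition above) =====
theorem find_closing_backticks_py_spec : Claim_equal_find_closing_backticks_py := by
  intro text _
  unfold Spec_find_closing_backticks_py find_closing_backticks_py find_closing_backticks_py_alt
  rw [pvLoopA_eq, pvLoopB_eq]
  cases pvFirstFrom text.toList 0 <;> simp
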